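-- pv_equiv track=rewrite | github.com/salioucd/Data-Structures | Coding Exercise 4.5.4 TooManyNames2.py | name_lists
-- ===== SOURCE A (Python) =====
-- def name_lists(fullnames):
--     result = dict()
--     for name in fullnames:
--         first = name.split()[0]
--         if first not in result:
--             result[first] = []
--         result[first].append(name)
--     for key in result:
--         result[key].sort()
--     return result
-- ===== SOURCE B (Python) =====
-- def name_lists(fullnames):
--     result = {}
--     for name in fullnames:
--         first = name.split()[0]
--         group = result.get(first)
--         if group is None:
--             group = result[first] = []
--         # binary-search insertion point (after any equal elements), keep group sorted
--         lo, hi = 0, len(group)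
--         while lo < hi:
--             mid = (lo + hi) // 2
--             if name < group[mid]:
--                 hi = mid
--             else:
--                 lo = mid + 1
--         group.insert(lo, name)
--     return result
-- ===== Notes on version B (the rewrite author's own statement) =====
-- stated objective: alternative
-- what changed: B keeps each group sorted as it is built, inserting every name at a hand-written binary-searched position, and drops A's separate per-key sort pass.
import Mathlib
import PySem

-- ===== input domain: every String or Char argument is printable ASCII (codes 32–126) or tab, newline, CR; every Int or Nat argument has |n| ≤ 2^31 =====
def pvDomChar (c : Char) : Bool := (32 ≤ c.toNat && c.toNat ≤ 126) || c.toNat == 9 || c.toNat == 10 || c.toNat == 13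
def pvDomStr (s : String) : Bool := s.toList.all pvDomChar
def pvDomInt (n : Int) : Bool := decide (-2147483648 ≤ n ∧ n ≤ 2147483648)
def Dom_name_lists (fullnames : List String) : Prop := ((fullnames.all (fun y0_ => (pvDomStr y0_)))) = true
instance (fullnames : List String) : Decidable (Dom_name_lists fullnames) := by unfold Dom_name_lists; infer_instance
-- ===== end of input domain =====

-- B groups full names by first word while keeping every group sorted, inserting each
-- name at its binary-searched position, instead of A's append-then-sort-each-group;
-- same return value.  Python A sorts the stored lists in place and B mutates the
-- stored group lists in place; the equivalence proved here is about the return value.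
-- A and B both mutate nothing observable through the return value; the dict is returned
-- as its insertion-ordered association list.

-- ===== PORT A =====
-- name.split()[0]; total form pyGetD, used only under Pre_ (split() nonempty)
def pvFirst (name : String) : String :=
  PySem.List.pyGetD (PySem.Str.split₀ name) 0 ""

def name_lists (fullnames : List String) : List (String × List String) :=
  let result := fullnames.foldl (fun d name =>
      let first := pvFirst name
      let d := if d.contains first then d else d.insert first ([] : List String)
      d.modify first [] (fun l => l ++ [name])) PySem.Dict.empty
  let result := result.keys.foldl (fun d key =>
      d.modify key [] (fun l => PySem.List.sorted l (fun x => x) false)) result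
  result.items

-- ===== PORT B =====
-- Source B's binary-search loop for the insertion point; loop indices stay nonnegative in
-- Python, so they are Nat here, (lo+hi)//2 is Nat division, and group[mid] (always in
-- range: lo ≤ mid < hi ≤ len) is getD
def pvBisect (group : List String) (name : String) (lo hi : Nat) : Nat :=
  if lo < hi then
    let mid := (lo + hi) / 2
    if name < group.getD mid "" then pvBisect group name lo mid
    else pvBisect group name (mid + 1) hi
  else lo
termination_by hi - lo
decreasing_by all_goals omega

def name_lists_alt (fullnames : List String) : List (String × List String) :=
  (fullnames.foldl (fun d name =>
      let first := pvFirst name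
      let group := d.getD first []
      let lo := pvBisect group name 0 group.length
      d.insert first (PySem.List.insert group (lo : Int) name)) PySem.Dict.empty).items

-- ===== PRECONDITION & SPEC =====
-- Pre_ excludes inputs containing a name that is empty or whitespace-only: there
-- name.split()[0] raises IndexError in A (and in B alike).
def Pre_name_lists (fullnames : List String) : Prop :=
  ∀ name ∈ fullnames, PySem.Str.split₀ name ≠ []
instance (fullnames : List String) : Decidable (Pre_name_lists fullnames) := by
  unfold Pre_name_lists; infer_instance

def pvWitness_name_lists : List String := ["John Smith", "John Adams", "Mary Lee"]

def Spec_name_lists (fullnames : List String) (out : List (String × List String)) : Prop := out = name_lists_alt fullnames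
instance (fullnames : List String) (out : List (String × List String)) : Decidable (Spec_name_lists fullnames out) := by unfold Spec_name_lists; infer_instance

-- ===== CLAIM (what is proved, stated in full; the proofs are below) =====
def Claim_equal_name_lists : Prop := ∀ (fullnames : List String), Dom_name_lists fullnames → Pre_name_lists fullnames → Spec_name_lists fullnames (name_lists fullnames)

-- ===== LEMMAS AND PROOFS =====

-- A's loop body, rewritten to a single insert
theorem stepA_eq (d : PySem.Dict String (List String)) (name : String) :
    (let first := pvFirst name
     let d' := if d.contains first then d else d.insert first ([] : List String)
     d'.modify first [] (fun l => l ++ [name]))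
    = d.insert (pvFirst name) (d.getD (pvFirst name) [] ++ [name]) := by
  simp only [PySem.Dict.modify]
  by_cases h : d.contains (pvFirst name)
  · simp [h]
  · simp only [h, if_false, Bool.false_eq_true]
    rw [PySem.Dict.getD_insert_self, PySem.Dict.insert_insert_self,
        PySem.Dict.getD_of_not_contains d _ (by simpa using h)]

-- the binary search returns a right-bisection point of a sorted list
theorem pvBisect_spec (s : List String) (x : String) (lo hi : Nat)
    (hsort : s.Pairwise (· ≤ ·))
    (hlh : lo ≤ hi) (hhi : hi ≤ s.length)
    (hlo : ∀ j < lo, ¬ x < s.getD j "")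
    (hhi2 : ∀ j, hi ≤ j → j < s.length → x < s.getD j "") :
    pvBisect s x lo hi ≤ s.length ∧
    (∀ j < pvBisect s x lo hi, ¬ x < s.getD j "") ∧
    (∀ j, pvBisect s x lo hi ≤ j → j < s.length → x < s.getD j "") := by
  have hmono : ∀ i j : Nat, i ≤ j → j < s.length → s.getD i "" ≤ s.getD j "" := by
    intro i j hij hj
    rcases Nat.eq_or_lt_of_le hij with h | h
    · subst h; exact le_refl _
    · rw [List.getD_eq_getElem s "" (by omega), List.getD_eq_getElem s "" hj]
      exact List.pairwise_iff_getElem.mp hsort i j (by omega) hj h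
  induction lo, hi using pvBisect.induct s x with
  | case1 lo hi hlt mid hcmp ih =>
      rw [pvBisect, if_pos hlt, if_pos (by simpa [mid] using hcmp)]
      refine ih (by omega) (by omega) hlo ?_
      intro j hj1 hj2
      exact lt_of_lt_of_le (by simpa [mid] using hcmp) (hmono mid j hj1 hj2)
  | case2 lo hi hlt mid hcmp ih =>
      rw [pvBisect, if_pos hlt, if_neg (by simpa [mid] using hcmp)]
      refine ih (by omega) hhi ?_ hhi2
      intro j hj
      have hjm : j ≤ mid := by omega
      intro hxj
      have hmid : s.getD mid "" ≤ x := not_lt.mp (by simpa [mid] using hcmp)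
      exact absurd (lt_of_lt_of_le hxj (hmono j mid hjm (by omega))) (not_lt.mpr hmid)
  | case3 lo hi hlt =>
      rw [pvBisect, if_neg hlt]
      exact ⟨by omega, hlo, fun j hj1 hj2 => hhi2 j (by omega) hj2⟩

-- inserting at a right-bisection point is PySem's stable ordered insert
theorem insertAt_eq_insertBy (x : String) : ∀ (s : List String) (r : Nat), r ≤ s.length →
    (∀ j < r, ¬ x < s.getD j "") → (∀ j, r ≤ j → j < s.length → x < s.getD j "") →
    s.take r ++ x :: s.drop r = PySem.List.insertBy (fun a b => decide (a < b)) x s := by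
  intro s
  induction s with
  | nil =>
      intro r hr _ _
      have : r = 0 := by simpa using hr
      subst this; rfl
  | cons y t ih =>
      intro r hr h1 h2
      cases r with
      | zero =>
          have hy : x < y := by simpa using h2 0 (by omega) (by simp)
          simp [PySem.List.insertBy, hy]
      | succ m =>
          have hy : ¬ x < y := by simpa using h1 0 (by omega)
          simp only [List.take_succ_cons, List.drop_succ_cons, List.cons_append,
            PySem.List.insertBy, decide_eq_true_eq, hy, if_false]
          exact congrArg (y :: ·) (ih m (by simpa using hr)
            (fun j hj => by simpa using h1 (j + 1) (by omega))
            (fun j hj1 hj2 => by simpa using h2 (j + 1) (by omega) (by simpa using hj2)))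

-- B's loop body on a sorted group equals sorting the appended list
theorem pvInsertAt_sorted (v : List String) (x : String) :
    (let s := PySem.List.sorted v (fun y => y) false
     PySem.List.insert s ((pvBisect s x 0 s.length : Nat) : Int) x)
      = PySem.List.sorted (v ++ [x]) (fun y => y) false := by
  set s := PySem.List.sorted v (fun y => y) false with hs
  have hsort : s.Pairwise (· ≤ ·) := by
    simpa using PySem.List.sorted_pairwise v (fun y => y)
  obtain ⟨hle, hL, hR⟩ := pvBisect_spec s x 0 s.length hsort (by omega) (le_refl _)
    (by omega) (fun j hj1 hj2 => by omega)
  rw [PySem.List.insert_natCast s _ x hle, insertAt_eq_insertBy x s _ hle hL hR, hs,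
      PySem.List.sorted_eq_foldl_insertBy, PySem.List.sorted_eq_foldl_insertBy,
      List.foldl_append]
  rfl

-- 'map sorted over the values' of a dict
def mapVal (d : PySem.Dict String (List String)) : PySem.Dict String (List String) :=
  PySem.Dict.mk (d.items.map (fun p => (p.1, PySem.List.sorted p.2 (fun s => s) false)))

theorem contains_mapVal (d : PySem.Dict String (List String)) (k : String) :
    (mapVal d).contains k = d.contains k := by
  simp [mapVal, PySem.Dict.contains, List.any_map, Function.comp_def]

theorem getD_mapVal (d : PySem.Dict String (List String)) (k : String) :
    (mapVal d).getD k [] = PySem.List.sorted (d.getD k []) (fun s => s) false := by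
  obtain ⟨items⟩ := d
  induction items with
  | nil => rfl
  | cons p rest ih =>
      obtain ⟨pk, pv⟩ := p
      by_cases h : pk == k
      · simp [mapVal, PySem.Dict.getD_eq_get?_getD, PySem.Dict.get?_mk_cons, h]
      · simpa [mapVal, PySem.Dict.getD_eq_get?_getD, PySem.Dict.get?_mk_cons, h] using ih

theorem mapVal_insert (d : PySem.Dict String (List String)) (k : String) (v : List String) :
    mapVal (d.insert k v) = (mapVal d).insert k (PySem.List.sorted v (fun s => s) false) := by
  apply PySem.Dict.ext
  by_cases h : d.contains k
  · rw [show (mapVal (d.insert k v)).items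
        = (d.insert k v).items.map (fun p => (p.1, PySem.List.sorted p.2 (fun s => s) false)) from rfl,
      PySem.Dict.items_insert_of_contains d v h,
      PySem.Dict.items_insert_of_contains (mapVal d) _ (by rw [contains_mapVal]; exact h)]
    simp only [mapVal, List.map_map]
    apply List.map_congr_left
    intro p _
    by_cases hp : p.1 = k <;> simp [hp]
  · rw [show (mapVal (d.insert k v)).items
        = (d.insert k v).items.map (fun p => (p.1, PySem.List.sorted p.2 (fun s => s) false)) from rfl,
      PySem.Dict.items_insert_of_not_contains d v (by simpa using h),
      PySem.Dict.items_insert_of_not_contains (mapVal d) _ (by rw [contains_mapVal]; simpa using h)]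
    simp [mapVal]

-- loop invariant: B's fold from mapVal d equals mapVal of A's (insert-form) fold from d
theorem loopB_eq_mapVal (names : List String) :
    ∀ d : PySem.Dict String (List String),
    names.foldl (fun d name =>
        let first := pvFirst name
        let group := d.getD first []
        let lo := pvBisect group name 0 group.length
        d.insert first (PySem.List.insert group (lo : Int) name)) (mapVal d)
      = mapVal (names.foldl (fun d name => d.insert (pvFirst name) (d.getD (pvFirst name) [] ++ [name])) d) := by
  induction names with
  | nil => intro d; rfl
  | cons n ns ih =>
      intro d
      simp only [List.foldl_cons]
      rw [getD_mapVal, show (PySem.List.insert (PySem.List.sorted (d.getD (pvFirst n) []) (fun s => s) false)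
            ((pvBisect (PySem.List.sorted (d.getD (pvFirst n) []) (fun s => s) false) n 0
              (PySem.List.sorted (d.getD (pvFirst n) []) (fun s => s) false).length : Nat) : Int) n)
          = PySem.List.sorted (d.getD (pvFirst n) [] ++ [n]) (fun s => s) false
          from pvInsertAt_sorted (d.getD (pvFirst n) []) n, ← mapVal_insert, ih]

-- the per-key sorting pass applies 'sorted' once to every value
theorem foldl_sort_keys (sortf : List String → List String) :
    ∀ (ks : List String) (d : PySem.Dict String (List String)),
    d.keys.Nodup → ks.Nodup → (∀ k ∈ ks, d.contains k = true) →
    (ks.foldl (fun d k => d.insert k (sortf (d.getD k []))) d).items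
      = d.items.map (fun p => if p.1 ∈ ks then (p.1, sortf p.2) else p) := by
  intro ks
  induction ks with
  | nil => intro d _ _ _; simp
  | cons k ks ih =>
      intro d hnd hks hsub
      simp only [List.foldl_cons]
      have hc : d.contains k = true := hsub k (List.mem_cons_self ..)
      have hitems : (d.insert k (sortf (d.getD k []))).items
          = d.items.map (fun p => if p.1 == k then (k, sortf (d.getD k [])) else p) :=
        PySem.Dict.items_insert_of_contains d _ hc
      have hkeys : (d.insert k (sortf (d.getD k []))).keys = d.keys := by
        simp only [PySem.Dict.keys, hitems, List.map_map]
        apply List.map_congr_left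
        intro p _
        by_cases hp : p.1 = k <;> simp [hp]
      have hknotin : k ∉ ks := (List.nodup_cons.mp hks).1
      rw [ih (d.insert k (sortf (d.getD k []))) (by rw [hkeys]; exact hnd)
          (List.nodup_cons.mp hks).2
          (by intro k' hk'
              have := hsub k' (List.mem_cons_of_mem _ hk')
              rw [PySem.Dict.contains_insert, this, Bool.or_true]),
        hitems, List.map_map]
      apply List.map_congr_left
      intro p hp
      by_cases hpk : p.1 = k
      · have hgd : d.getD p.1 [] = p.2 :=
          PySem.Dict.getD_of_mem_items d (by simpa using hp) hnd []
        subst hpk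
        simp [hknotin, ← hgd]
      · simp only [Function.comp_apply, beq_iff_eq, hpk, if_false, List.mem_cons]
        by_cases hmem : p.1 ∈ ks <;> simp [hmem]

theorem keysA_nodup (fullnames : List String) :
    (fullnames.foldl (fun d name => d.insert (pvFirst name) (d.getD (pvFirst name) [] ++ [name]))
      (PySem.Dict.empty : PySem.Dict String (List String))).keys.Nodup :=
  PySem.Dict.nodup_keys_foldl_insert_key fullnames pvFirst _ _ PySem.Dict.nodup_keys_empty

-- ===== VERDICT (by name: the statement is the Claim_ definition above) =====
theorem name_lists_spec : Claim_equal_name_lists := by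
  intro fullnames _ _
  unfold Spec_name_lists name_lists name_lists_alt
  have hA : (fun (d : PySem.Dict String (List String)) (name : String) =>
      let first := pvFirst name
      let d' := if d.contains first then d else d.insert first ([] : List String)
      d'.modify first [] (fun l => l ++ [name]))
      = fun d name => d.insert (pvFirst name) (d.getD (pvFirst name) [] ++ [name]) := by
    funext d name; exact stepA_eq d name
  simp only [hA]
  set dA := fullnames.foldl
      (fun d name => d.insert (pvFirst name) (d.getD (pvFirst name) [] ++ [name]))
      (PySem.Dict.empty : PySem.Dict String (List String)) with hdA
  have hnd : dA.keys.Nodup := keysA_nodup fullnames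
  have h2 : (dA.keys.foldl (fun d key =>
        d.modify key [] (fun l => PySem.List.sorted l (fun x => x) false)) dA).items
      = dA.items.map (fun p => (p.1, PySem.List.sorted p.2 (fun s => s) false)) := by
    simp only [PySem.Dict.modify]
    rw [foldl_sort_keys (fun l => PySem.List.sorted l (fun x => x) false) dA.keys dA hnd hnd
        (fun k hk => (PySem.Dict.contains_iff_mem_keys dA k).mpr hk)]
    apply List.map_congr_left
    intro p hp
    simp [PySem.Dict.mem_keys_of_mem_items dA hp]
  rw [h2]
  have := loopB_eq_mapVal fullnames PySem.Dict.empty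
  have hempty : mapVal PySem.Dict.empty = (PySem.Dict.empty : PySem.Dict String (List String)) := rfl
  rw [hempty] at this
  rw [this]
  rfl
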